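-- pv_equiv track=rewrite | github.com/samandalib/Coding-Challenges | Double Cola/Double Cola-Iterative as wanted.py | whoIsNext
-- ===== SOURCE A (Python) =====
-- def whoIsNext(names, r):
--     counter = r
--     while counter > 1:
--             names.append(names[0])
--             names.append(names[0])
--             counter -= 1
--             names.remove(names[0])
--     return names[0]
-- ===== SOURCE B (Python) =====
-- def whoIsNext(names, r):
--     n = len(names)
--     m = max(r, 1)
--     width = 1
--     while m > n * width:
--         m -= n * width
--         width *= 2
--     return names[(m - 1) // width]
-- ===== Notes on version B (the rewrite author's own statement) =====
-- stated objective: faster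
-- what changed: B replaces A's per-serving queue simulation (pop one, append two copies, r-1 times) with closed-form round arithmetic: subtract the geometrically doubling round sizes n*2^i from r and index the original list by division, so the queue is never materialised.
import Mathlib
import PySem

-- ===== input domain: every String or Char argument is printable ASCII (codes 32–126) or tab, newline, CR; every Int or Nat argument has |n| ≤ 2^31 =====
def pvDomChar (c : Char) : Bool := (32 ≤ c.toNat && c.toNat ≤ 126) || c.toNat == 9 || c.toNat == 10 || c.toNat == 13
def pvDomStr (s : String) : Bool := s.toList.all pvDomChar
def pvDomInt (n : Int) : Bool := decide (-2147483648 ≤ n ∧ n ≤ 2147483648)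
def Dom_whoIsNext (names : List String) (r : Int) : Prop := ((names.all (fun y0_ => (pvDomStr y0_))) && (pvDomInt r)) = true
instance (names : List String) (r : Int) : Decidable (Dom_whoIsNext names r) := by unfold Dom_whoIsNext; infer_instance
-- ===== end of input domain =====

-- B replaces A's per-serving queue simulation with closed-form round arithmetic (subtract
-- doubling round sizes, then index by division); equivalence is about the RETURN value only
-- (Python A mutates `names` in place, B does not).

-- ===== PORT A =====
-- the `while counter > 1` loop; state = names (the mutated list)
def whoIsNextGoA (names : List String) (counter : Int) : List String :=
  if _h : counter > 1 then
    match names with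
    | [] => []  -- Python: names[0] raises IndexError here; Pre_ excludes empty names
    | x :: t =>
      -- names.append(names[0]); names.append(names[0]); names.remove(names[0])
      whoIsNextGoA ((PySem.List.remove? ((x :: t) ++ [x, x]) x).getD []) (counter - 1)
  else names
termination_by counter.toNat
decreasing_by omega

def whoIsNext (names : List String) (r : Int) : String :=
  -- return names[0]  (raises on empty list; Pre_ excludes it, so the default is never used)
  (PySem.List.pyGet? (whoIsNextGoA names r) 0).getD ""

-- ===== PORT B =====
-- the `while m > n * width` loop of Source B; the extra `1 ≤ n ∧ 1 ≤ width` conjunct is a pure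
-- totality guard (Python B never terminates when n = 0; under Pre_ both bounds always hold)
def whoIsNextGoB (n m width : Int) : Int × Int :=
  if h : m > n * width ∧ 1 ≤ n ∧ 1 ≤ width then
    whoIsNextGoB n (m - n * width) (width * 2)
  else (m, width)
termination_by m.toNat
decreasing_by
  have h1 : (0:Int) < n * width := mul_pos (by omega) (by omega)
  omega

def whoIsNext_alt (names : List String) (r : Int) : String :=
  let n : Int := names.length
  let m : Int := max r 1
  let p := whoIsNextGoB n m 1
  -- return names[(m - 1) // width]  (in range under Pre_, so the default is never used)
  (PySem.List.pyGet? names (PySem.Int.floordiv (p.1 - 1) p.2)).getD ""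

-- ===== PRECONDITION & SPEC =====
-- Pre_ excludes only the empty list, on which Python A raises IndexError (names[0]).
def Pre_whoIsNext (names : List String) (r : Int) : Prop := names ≠ []
instance (names : List String) (r : Int) : Decidable (Pre_whoIsNext names r) := by
  unfold Pre_whoIsNext; infer_instance
def pvWitness_whoIsNext : List String × Int := (["a", "b"], 5)

def Spec_whoIsNext (names : List String) (r : Int) (out : String) : Prop := out = whoIsNext_alt names r
instance (names : List String) (r : Int) (out : String) : Decidable (Spec_whoIsNext names r out) := by unfold Spec_whoIsNext; infer_instance

-- ===== CLAIM (what is proved, stated in full; the proofs are below) =====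
def Claim_equal_whoIsNext : Prop := ∀ (names : List String) (r : Int), Dom_whoIsNext names r → Pre_whoIsNext names r → Spec_whoIsNext names r (whoIsNext names r)

-- ===== LEMMAS AND PROOFS =====

-- one serving: pop the front person, append two copies of them
def stepQ (L : List String) : List String :=
  match L with
  | [] => []
  | x :: t => t ++ [x, x]

-- each person doubled, in order
def dupQ (L : List String) : List String := L.flatMap (fun x => [x, x])

lemma stepQ_iter_nil (k : Nat) : stepQ^[k] ([] : List String) = [] := by
  induction k with
  | zero => rfl
  | succ k ih => rw [Function.iterate_succ_apply]; exact ih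

lemma goA_nil (c : Int) : whoIsNextGoA [] c = [] := by
  rw [whoIsNextGoA.eq_def]; split <;> rfl

lemma goA_eq_iter (names : List String) (counter : Int) :
    whoIsNextGoA names counter = stepQ^[(counter - 1).toNat] names := by
  by_cases h : counter > 1
  · have hk : (counter - 1).toNat = (counter - 1 - 1).toNat + 1 := by omega
    cases names with
    | nil => rw [goA_nil, stepQ_iter_nil]
    | cons x t =>
        have hstep : whoIsNextGoA (x :: t) counter
            = whoIsNextGoA ((PySem.List.remove? ((x :: t) ++ [x, x]) x).getD []) (counter - 1) := by
          rw [whoIsNextGoA.eq_def, dif_pos h]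
        have hrem : PySem.List.remove? ((x :: t) ++ [x, x]) x = some (t ++ [x, x]) := by
          simpa using PySem.List.remove?_cons_self (t ++ [x, x]) x
        rw [hstep, hrem]
        simp only [Option.getD_some]
        rw [goA_eq_iter (t ++ [x, x]) (counter - 1), hk, Function.iterate_succ_apply]
        rfl
  · rw [whoIsNextGoA.eq_def, dif_neg h]
    have : (counter - 1).toNat = 0 := by omega
    rw [this]; rfl
termination_by counter.toNat
decreasing_by all_goals omega

lemma dupQ_append (L M : List String) : dupQ (L ++ M) = dupQ L ++ dupQ M := by
  simp [dupQ]

lemma stepQ_iter_le (k : Nat) (L : List String) (hk : k ≤ L.length) :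
    stepQ^[k] L = L.drop k ++ dupQ (L.take k) := by
  induction k with
  | zero => simp [dupQ]
  | succ k ih =>
      have hk' : k < L.length := by omega
      rw [Function.iterate_succ_apply', ih (by omega)]
      have hdrop : L.drop k = L[k] :: L.drop (k + 1) := List.drop_eq_getElem_cons hk'
      rw [hdrop]
      have : stepQ (L[k] :: (L.drop (k + 1) ++ dupQ (L.take k)))
          = (L.drop (k + 1) ++ dupQ (L.take k)) ++ [L[k], L[k]] := rfl
      rw [List.cons_append, this]
      have htake : L.take (k + 1) = L.take k ++ [L[k]] := by
        rw [List.take_succ]; simp [List.getElem?_eq_getElem hk']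
      rw [htake, dupQ_append]
      simp [dupQ]

lemma stepQ_iter_len (L : List String) : stepQ^[L.length] L = dupQ L := by
  rw [stepQ_iter_le L.length L le_rfl]; simp

lemma dupQ_getElem? (L : List String) (j : Nat) : (dupQ L)[j]? = L[j / 2]? := by
  induction L generalizing j with
  | nil => simp [dupQ]
  | cons x t ih =>
      have hd : dupQ (x :: t) = x :: x :: dupQ t := rfl
      match j with
      | 0 => simp [hd]
      | 1 => simp [hd]
      | (j + 2) =>
          rw [hd]
          simp only [List.getElem?_cons_succ]
          rw [ih j]
          have : (j + 2) / 2 = j / 2 + 1 := by omega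
          rw [this]
          simp

lemma goB_stop {n m width : Int} (h : ¬ (m > n * width ∧ 1 ≤ n ∧ 1 ≤ width)) :
    whoIsNextGoB n m width = (m, width) := by
  rw [whoIsNextGoB, dif_neg h]

lemma goB_step {n m width : Int} (h : m > n * width ∧ 1 ≤ n ∧ 1 ≤ width) :
    whoIsNextGoB n m width = whoIsNextGoB n (m - n * width) (width * 2) := by
  rw [whoIsNextGoB, dif_pos h]

-- invariants of the final state
lemma goB_inv (n m width : Int) (hn : 1 ≤ n) (hw : 1 ≤ width) (hm : 1 ≤ m) :
    1 ≤ (whoIsNextGoB n m width).1 ∧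
    (whoIsNextGoB n m width).1 ≤ n * (whoIsNextGoB n m width).2 ∧
    width ≤ (whoIsNextGoB n m width).2 := by
  by_cases h : m > n * width ∧ 1 ≤ n ∧ 1 ≤ width
  · rw [goB_step h]
    have := goB_inv n (m - n * width) (width * 2) hn (by omega) (by omega)
    exact ⟨this.1, this.2.1, by omega⟩
  · rw [goB_stop h]
    have hng : ¬ (m > n * width) := fun hc => h ⟨hc, hn, hw⟩
    exact ⟨hm, by show m ≤ n * width; omega, le_rfl⟩
termination_by m.toNat
decreasing_by
  have h1 : (0:Int) < n * width := mul_pos (by omega) (by omega)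
  omega

-- halving the list-length doubles the widths but keeps the m-sequence
lemma goB_double (n m w : Int) (hn : 1 ≤ n) (hw : 1 ≤ w) :
    whoIsNextGoB n m (w * 2)
      = ((whoIsNextGoB (n * 2) m w).1, (whoIsNextGoB (n * 2) m w).2 * 2) := by
  by_cases h : m > (n * 2) * w ∧ 1 ≤ n * 2 ∧ 1 ≤ w
  · have h' : m > n * (w * 2) ∧ 1 ≤ n ∧ 1 ≤ w * 2 := by
      refine ⟨by nlinarith [h.1], hn, by omega⟩
    rw [goB_step h, goB_step h']
    have harg : m - n * (w * 2) = m - (n * 2) * w := by ring_nf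
    rw [harg]
    exact goB_double n (m - (n * 2) * w) (w * 2) hn (by omega)
  · have h' : ¬ (m > n * (w * 2) ∧ 1 ≤ n ∧ 1 ≤ w * 2) := by
      intro hc
      exact h ⟨by nlinarith [hc.1], by omega, hw⟩
    rw [goB_stop h, goB_stop h']
termination_by m.toNat
decreasing_by
  have h1 : (0:Int) < (n * 2) * w := mul_pos (by omega) (by omega)
  omega

-- the index B computes, as a Nat
def resIdx (n m : Int) : Nat :=
  (PySem.Int.floordiv ((whoIsNextGoB n m 1).1 - 1) (whoIsNextGoB n m 1).2).toNat

lemma resIdx_small (n m : Int) (h : m ≤ n) (hm : 1 ≤ m) : resIdx n m = (m - 1).toNat := by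
  unfold resIdx
  have hs : whoIsNextGoB n m 1 = (m, 1) := goB_stop (by intro hc; omega)
  rw [hs]
  simp [PySem.Int.floordiv_eq_ediv_of_pos (by omega : (0:Int) < 1)]

lemma toNat_floordiv_double (a b : Int) (ha : 0 ≤ a) (hb : 1 ≤ b) :
    (PySem.Int.floordiv a (b * 2)).toNat = (PySem.Int.floordiv a b).toNat / 2 := by
  obtain ⟨a', rfl⟩ : ∃ a' : Nat, a = (a' : Int) := ⟨a.toNat, by omega⟩
  obtain ⟨b', rfl⟩ : ∃ b' : Nat, b = (b' : Int) := ⟨b.toNat, by omega⟩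
  have hcast : (b' : Int) * 2 = ((b' * 2 : Nat) : Int) := by push_cast; ring
  rw [hcast, PySem.Int.floordiv_natCast, PySem.Int.floordiv_natCast,
      Int.toNat_natCast, Int.toNat_natCast, Nat.div_div_eq_div_mul]

lemma resIdx_big (n m : Int) (hn : 1 ≤ n) (h : n < m) :
    resIdx n m = resIdx (n * 2) (m - n) / 2 := by
  unfold resIdx
  rw [goB_step ⟨by omega, hn, le_rfl⟩, goB_double n (m - n * 1) 1 hn le_rfl]
  have harg : m - n * 1 = m - n := by ring
  rw [harg]
  set p := whoIsNextGoB (n * 2) (m - n) 1 with hp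
  have hinv := goB_inv (n * 2) (m - n) 1 (by omega) le_rfl (by omega)
  rw [← hp] at hinv
  exact toNat_floordiv_double (p.1 - 1) p.2 (by omega) (by omega)

lemma dupQ_length (L : List String) : (dupQ L).length = 2 * L.length := by
  induction L with
  | nil => rfl
  | cons x t iht => simp [dupQ] at iht ⊢; omega

-- the heart of the proof: the head of the simulated queue after k servings is the
-- element of the original list at B's computed index for m = k + 1
lemma head_iter : ∀ (k : Nat) (L : List String), L ≠ [] →
    (stepQ^[k] L)[0]? = L[resIdx (L.length : Int) ((k : Int) + 1)]? := by
  intro k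
  induction k using Nat.strong_induction_on with
  | _ k ih =>
    intro L hL
    have hlen : 1 ≤ L.length := List.length_pos_iff.mpr hL
    by_cases hk : k < L.length
    · -- still in the first round
      have hidx : resIdx (L.length : Int) ((k : Int) + 1) = k := by
        rw [resIdx_small _ _ (by push_cast; omega) (by omega)]
        omega
      rw [hidx, stepQ_iter_le k L (le_of_lt hk),
          List.getElem?_append_left (by simp; omega), List.getElem?_drop]
      simp
    · -- peel off one full round: stepQ^[len] L = dupQ L
      have hk' : L.length ≤ k := by omega
      have hsplit : stepQ^[k] L = stepQ^[k - L.length] (dupQ L) := by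
        conv_lhs => rw [show k = (k - L.length) + L.length by omega]
        rw [Function.iterate_add_apply, stepQ_iter_len]
      have hdnil : dupQ L ≠ [] := by
        cases L with
        | nil => exact absurd rfl hL
        | cons x t => simp [dupQ]
      have hlt : k - L.length < k := by omega
      have hih := ih (k - L.length) hlt (dupQ L) hdnil
      rw [hsplit, hih, dupQ_getElem?, dupQ_length]
      congr 1
      have hbig : resIdx (L.length : Int) ((k : Int) + 1)
          = resIdx ((L.length : Int) * 2) ((k : Int) + 1 - (L.length : Int)) / 2 := by
        apply resIdx_big _ _ (by exact_mod_cast hlen)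
        have : (L.length : Int) ≤ (k : Int) := by exact_mod_cast hk'
        omega
      rw [hbig]
      congr 2
      · push_cast; ring
      · have : ((k - L.length : Nat) : Int) + 1 = (k : Int) + 1 - (L.length : Int) := by
          omega
        rw [this]

-- the loop count of A and the clamped m of B match: (r-1).toNat + 1 = max r 1
lemma count_eq (r : Int) : ((r - 1).toNat : Int) + 1 = max r 1 := by omega

-- ===== VERDICT (by name: the statement is the Claim_ definition above) =====
theorem whoIsNext_spec : Claim_equal_whoIsNext := by
  intro names r _hDom hPre
  unfold Spec_whoIsNext
  have hB : whoIsNext_alt names r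
      = (PySem.List.pyGet? names
          (PySem.Int.floordiv ((whoIsNextGoB (names.length : Int) (max r 1) 1).1 - 1)
            (whoIsNextGoB (names.length : Int) (max r 1) 1).2)).getD "" := rfl
  have hA : whoIsNext names r = ((stepQ^[(r - 1).toNat] names)[0]?).getD "" := by
    unfold whoIsNext
    rw [goA_eq_iter, PySem.List.pyGet?_zero]
  rw [hA, hB]
  have hlen : 1 ≤ names.length := List.length_pos_iff.mpr hPre
  have hhead := head_iter (r - 1).toNat names hPre
  rw [count_eq] at hhead
  set p := whoIsNextGoB (names.length : Int) (max r 1) 1 with hp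
  have hinv := goB_inv (names.length : Int) (max r 1) 1 (by exact_mod_cast hlen) le_rfl (by omega)
  rw [← hp] at hinv
  obtain ⟨hm1, _, hw1⟩ := hinv
  have hnn : 0 ≤ PySem.Int.floordiv (p.1 - 1) p.2 := by
    rw [PySem.Int.floordiv_eq_ediv_of_pos (by omega : (0:Int) < p.2)]
    exact Int.ediv_nonneg (by omega) (by omega)
  have hg := PySem.List.pyGet?_of_nonneg (xs := names) hnn
  rw [hg, hhead]
  rfl
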